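-- pv_equiv track=rewrite | github.com/Collapsezouz/LLM2test | llm_model/utils/chat_util.py | __input_output_idx_tuple_iter
-- ===== SOURCE A (Python) =====
-- def __input_output_idx_tuple_iter(is_output_iter):
--     output_pos_begin = None
--     for i, is_output in enumerate(is_output_iter):
--         if is_output:
--             if output_pos_begin is None:
--                 output_pos_begin = i
--             continue
--         if output_pos_begin is not None:
--             yield output_pos_begin, i
--             output_pos_begin = None
--     if output_pos_begin is not None:
--         yield output_pos_begin, i+1
-- ===== SOURCE B (Python) =====
-- def __input_output_idx_tuple_iter(is_output_iter):
--     # Split into maximal runs of equal truthiness, then emit the True runs.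
--     seq = list(is_output_iter)
--     runs = []
--     i, n = 0, len(seq)
--     while i < n:
--         v = bool(seq[i])
--         j = i + 1
--         while j < n and bool(seq[j]) == v:
--             j += 1
--         runs.append((v, j - i))
--         i = j
--     idx = 0
--     for v, count in runs:
--         if v:
--             yield idx, idx + count
--         idx += count
-- ===== Notes on version B (the rewrite author's own statement) =====
-- stated objective: alternative
-- what changed: Replaces A's element-by-element state machine (open-segment start sentinel plus a final flush) with a run-length decomposition: the list is first split into maximal runs of equal truthiness, then True runs are emitted with a running index, no end-of-input special case.
import Mathlib
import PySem

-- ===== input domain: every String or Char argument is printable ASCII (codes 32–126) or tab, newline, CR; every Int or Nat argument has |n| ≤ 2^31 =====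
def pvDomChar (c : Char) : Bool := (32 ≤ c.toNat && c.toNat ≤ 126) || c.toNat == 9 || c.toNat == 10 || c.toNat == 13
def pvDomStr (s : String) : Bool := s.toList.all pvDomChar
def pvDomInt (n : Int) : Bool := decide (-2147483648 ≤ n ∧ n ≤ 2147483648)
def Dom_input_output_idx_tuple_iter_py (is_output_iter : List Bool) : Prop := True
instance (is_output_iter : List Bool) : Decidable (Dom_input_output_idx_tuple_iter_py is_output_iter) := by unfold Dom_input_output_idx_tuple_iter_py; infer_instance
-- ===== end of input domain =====

-- B replaces A's per-element open-segment state machine with a run-length decomposition (split into maximal runs, then emit True runs); alternative structure, same O(n) cost.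


-- ===== PORT A =====
def ioA_go : List Bool → Int → Option Int → List (Int × Int)
  | [], i, b => (match b with | some v => [(v, i)] | none => [])
  | x :: xs, i, b =>
      if x then ioA_go xs (i+1) (match b with | none => some i | some v => some v)
      else (match b with
        | some v => (v, i) :: ioA_go xs (i+1) none
        | none => ioA_go xs (i+1) none)

def input_output_idx_tuple_iter_py (is_output_iter : List Bool) : List (Int × Int) :=
  ioA_go is_output_iter 0 none

-- ===== PORT B =====
-- takeRun: length of the maximal leading run equal to x, and the remainder (B's inner while loop)
def takeRun (x : Bool) : List Bool → Nat × List Bool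
  | [] => (0, [])
  | y :: ys => if y = x then let p := takeRun x ys; (p.1 + 1, p.2) else (0, y :: ys)

theorem takeRun_len_le (x : Bool) : ∀ (xs : List Bool), (takeRun x xs).2.length ≤ xs.length := by
  intro xs; induction xs with
  | nil => simp [takeRun]
  | cons y ys ih =>
    by_cases h : y = x
    · simp [takeRun, h]; omega
    · simp [takeRun, h]

-- runsB: split into maximal runs of equal value (B's outer while loop)
def runsB : List Bool → List (Bool × Nat)
  | [] => []
  | x :: xs => (x, (takeRun x xs).1 + 1) :: runsB (takeRun x xs).2
termination_by xs => xs.length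
decreasing_by have := takeRun_len_le x xs; simp; omega

def input_output_idx_tuple_iter_py_alt (is_output_iter : List Bool) : List (Int × Int) :=
  ((runsB is_output_iter).foldl
    (fun (st : List (Int × Int) × Int) (r : Bool × Nat) =>
      (if r.1 then st.1 ++ [(st.2, st.2 + (r.2 : Int))] else st.1, st.2 + (r.2 : Int)))
    ([], 0)).1

-- ===== PRECONDITION & SPEC =====
def Spec_input_output_idx_tuple_iter_py (is_output_iter : List Bool) (out : List (Int × Int)) : Prop := out = input_output_idx_tuple_iter_py_alt is_output_iter
instance (is_output_iter : List Bool) (out : List (Int × Int)) : Decidable (Spec_input_output_idx_tuple_iter_py is_output_iter out) := by unfold Spec_input_output_idx_tuple_iter_py; infer_instance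

-- ===== CLAIM (what is proved, stated in full; the proofs are below) =====
def Claim_equal_input_output_idx_tuple_iter_py : Prop := ∀ (is_output_iter : List Bool), Dom_input_output_idx_tuple_iter_py is_output_iter → Spec_input_output_idx_tuple_iter_py is_output_iter (input_output_idx_tuple_iter_py is_output_iter)

-- ===== LEMMAS AND PROOFS =====

theorem takeRun_split (x : Bool) : ∀ (xs : List Bool),
    xs = List.replicate (takeRun x xs).1 x ++ (takeRun x xs).2 := by
  intro xs; induction xs with
  | nil => simp [takeRun]
  | cons y ys ih =>
    by_cases h : y = x
    · subst h; simp [takeRun, List.replicate_succ]; exact ih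
    · simp [takeRun, h]

theorem takeRun_rest_head (x : Bool) : ∀ (xs : List Bool),
    (takeRun x xs).2.head? ≠ some x := by
  intro xs; induction xs with
  | nil => simp [takeRun]
  | cons y ys ih =>
    by_cases h : y = x
    · simpa [takeRun, h] using ih
    · simp [takeRun, h]

theorem ioA_go_replicate_true (k : Nat) : ∀ (xs : List Bool) (i v : Int),
    ioA_go (List.replicate k true ++ xs) i (some v) = ioA_go xs (i + k) (some v) := by
  induction k with
  | zero => intro xs i v; simp
  | succ n ih =>
    intro xs i v
    rw [List.replicate_succ]
    show ioA_go (true :: (List.replicate n true ++ xs)) i (some v) = _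
    rw [ioA_go, if_pos rfl, ih, show i + 1 + (n:Int) = i + ((n+1:Nat):Int) by push_cast; ring]

theorem ioA_go_replicate_false (k : Nat) : ∀ (xs : List Bool) (i : Int),
    ioA_go (List.replicate k false ++ xs) i none = ioA_go xs (i + k) none := by
  induction k with
  | zero => intro xs i; simp
  | succ n ih =>
    intro xs i
    rw [List.replicate_succ]
    show ioA_go (false :: (List.replicate n false ++ xs)) i none = _
    rw [ioA_go, if_neg (by simp), ih, show i + 1 + (n:Int) = i + ((n+1:Nat):Int) by push_cast; ring]

theorem ioA_go_emit (xs : List Bool) (i v : Int) (h : xs.head? ≠ some true) :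
    ioA_go xs i (some v) = (v, i) :: ioA_go xs i none := by
  cases xs with
  | nil => rfl
  | cons y ys =>
    cases y with
    | true => simp at h
    | false => rfl

theorem runsB_fold_eq : ∀ (xs : List Bool) (acc : List (Int × Int)) (idx : Int),
    ((runsB xs).foldl
      (fun (st : List (Int × Int) × Int) (r : Bool × Nat) =>
        (if r.1 then st.1 ++ [(st.2, st.2 + (r.2 : Int))] else st.1, st.2 + (r.2 : Int)))
      (acc, idx)).1 = acc ++ ioA_go xs idx none := by
  intro xs
  induction xs using runsB.induct with
  | case1 => intro acc idx; simp [runsB, ioA_go]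
  | case2 x xs ih =>
    intro acc idx
    rw [runsB, List.foldl_cons, ih]
    have hsplit := takeRun_split x xs
    have hhead := takeRun_rest_head x xs
    set k := (takeRun x xs).1 with hk
    set rest := (takeRun x xs).2 with hr
    have hxxs : x :: xs = List.replicate (k + 1) x ++ rest := by
      rw [List.replicate_succ]; simp; exact hsplit
    cases x with
    | true =>
      have h1 : ioA_go (true :: xs) idx none
          = (idx, idx + ((k : Int) + 1)) :: ioA_go rest (idx + ((k : Int) + 1)) none := by
        rw [hxxs, List.replicate_succ]
        show ioA_go (true :: (List.replicate k true ++ rest)) idx none = _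
        rw [ioA_go, if_pos rfl, ioA_go_replicate_true, ioA_go_emit rest _ _ hhead,
          show idx + 1 + (k:Int) = idx + ((k:Int) + 1) by ring]
      simp only [h1]
      have : idx + ((k : Int) + 1) = idx + ((k + 1 : Nat) : Int) := by push_cast; ring
      simp [this]
    | false =>
      have h1 : ioA_go (false :: xs) idx none = ioA_go rest (idx + ((k : Int) + 1)) none := by
        rw [hxxs, List.replicate_succ]
        show ioA_go (false :: (List.replicate k false ++ rest)) idx none = _
        rw [ioA_go, if_neg (by simp), ioA_go_replicate_false,
          show idx + 1 + (k:Int) = idx + ((k:Int) + 1) by ring]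
      simp [h1]

-- ===== VERDICT (by name: the statement is the Claim_ definition above) =====
theorem input_output_idx_tuple_iter_py_spec : Claim_equal_input_output_idx_tuple_iter_py := by
  intro xs _
  show ioA_go xs 0 none = _
  unfold input_output_idx_tuple_iter_py_alt
  rw [runsB_fold_eq xs [] 0]
  simp
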